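-- pv_equiv track=rewrite | github.com/mrzvinograd/MusicRecs | stage3/recommend_pipeline.py | build_stage3_playlist_indices
-- ===== SOURCE A (Python) =====
-- def build_stage3_playlist_indices(playlist_track_ids, filtered_track_map, pad_idx, max_len=20):
--     playlist_indices = [filtered_track_map[track_id] for track_id in playlist_track_ids if track_id in filtered_track_map]
--
--     if not playlist_indices:
--         raise ValueError("None of the provided playlist tracks were found in the stage3 filtered track map.")
--
--     playlist_indices = playlist_indices[-max_len:]
--
--     if len(playlist_indices) < max_len:
--         playlist_indices = [pad_idx] * (max_len - len(playlist_indices)) + playlist_indices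
--
--     return playlist_indices
-- ===== SOURCE B (Python) =====
-- def build_stage3_playlist_indices(playlist_track_ids, filtered_track_map, pad_idx, max_len=20):
--     # Walk the playlist from the tail, collecting mapped indices until max_len
--     # are found (early stop), then reverse and left-pad.
--     collected = []
--     for track_id in reversed(playlist_track_ids):
--         if len(collected) == max_len:
--             break
--         if track_id in filtered_track_map:
--             collected.append(filtered_track_map[track_id])
--     if not collected:
--         raise ValueError("None of the provided playlist tracks were found in the stage3 filtered track map.")
--     collected.reverse()
--     return [pad_idx] * (max_len - len(collected)) + collected
-- ===== Notes on version B (the rewrite author's own statement) =====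
-- stated objective: alternative
-- what changed: B scans the playlist from the tail and stops as soon as max_len mapped indices are collected (then reverses and left-pads), instead of A's building the full filtered list and slicing its last max_len elements.
-- outside the precondition, e.g. on build_stage3_playlist_indices([1], {1: 5}, 0, 0): A returns [5], B raises ValueError; on build_stage3_playlist_indices([1, 2], {1: 5, 2: 6}, 0, -1): A returns [6], B returns [5, 6]
import Mathlib
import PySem

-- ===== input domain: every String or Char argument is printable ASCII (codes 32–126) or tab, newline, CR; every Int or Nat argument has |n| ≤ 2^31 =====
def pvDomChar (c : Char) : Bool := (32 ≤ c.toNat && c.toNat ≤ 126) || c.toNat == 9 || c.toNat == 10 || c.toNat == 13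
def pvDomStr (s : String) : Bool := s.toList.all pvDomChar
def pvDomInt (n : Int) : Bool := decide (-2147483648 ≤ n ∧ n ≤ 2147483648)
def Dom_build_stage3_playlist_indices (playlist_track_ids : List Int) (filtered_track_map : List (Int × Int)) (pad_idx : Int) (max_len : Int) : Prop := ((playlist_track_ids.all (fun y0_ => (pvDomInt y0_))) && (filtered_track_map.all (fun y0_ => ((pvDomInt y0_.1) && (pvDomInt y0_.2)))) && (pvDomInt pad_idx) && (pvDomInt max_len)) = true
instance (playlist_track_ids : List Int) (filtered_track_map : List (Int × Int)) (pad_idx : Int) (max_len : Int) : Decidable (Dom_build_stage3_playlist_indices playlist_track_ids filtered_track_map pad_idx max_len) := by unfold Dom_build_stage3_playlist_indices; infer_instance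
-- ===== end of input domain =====

-- B walks the playlist from the tail collecting mapped indices until max_len are found
-- (early stop), then reverses and left-pads, instead of A's filter-all-then-slice; objective: alternative.


-- ===== PORT A =====
-- transliteration of A: build the full filtered list (comprehension = left fold appending
-- each dict match), raise if empty (outside Pre_; port returns []), slice last max_len, left-pad
def build_stage3_playlist_indices (playlist_track_ids : List Int) (filtered_track_map : List (Int × Int)) (pad_idx : Int) (max_len : Int) : List Int :=
  let playlist_indices :=
    playlist_track_ids.foldl (fun acc track_id =>
      match List.lookup track_id filtered_track_map with
      | some v => acc ++ [v]
      | none => acc) []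
  if playlist_indices = [] then []  -- Python raises ValueError here (excluded by Pre_)
  else
    let playlist_indices := PySem.List.slice playlist_indices (some (-max_len)) none
    if (playlist_indices.length : Int) < max_len then
      List.replicate (max_len - playlist_indices.length).toNat pad_idx ++ playlist_indices
    else playlist_indices

-- ===== PORT B =====
-- transliteration of B's tail-first loop: stop once max_len indices are collected
def pvCollectTail (filtered_track_map : List (Int × Int)) (max_len : Int) : List Int → List Int → List Int
  | [], collected => collected
  | track_id :: rest, collected =>
    if (collected.length : Int) = max_len then collected
    else match List.lookup track_id filtered_track_map with
      | some v => pvCollectTail filtered_track_map max_len rest (collected ++ [v])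
      | none => pvCollectTail filtered_track_map max_len rest collected

def build_stage3_playlist_indices_alt (playlist_track_ids : List Int) (filtered_track_map : List (Int × Int)) (pad_idx : Int) (max_len : Int) : List Int :=
  let collected := pvCollectTail filtered_track_map max_len playlist_track_ids.reverse []
  if collected = [] then []  -- Python raises ValueError here (excluded by Pre_)
  else List.replicate (max_len - collected.length).toNat pad_idx ++ collected.reverse

-- ===== PRECONDITION & SPEC =====
-- Pre_ excludes (a) inputs where no playlist id is in the map: both programs raise ValueError;
-- (b) max_len <= 0, outside the function's natural domain (max_len is a padding length, default 20):
-- there A returns an unpadded suffix while B raises ValueError (max_len = 0) or keeps every match.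
def Pre_build_stage3_playlist_indices (playlist_track_ids : List Int) (filtered_track_map : List (Int × Int)) (pad_idx : Int) (max_len : Int) : Prop :=
  (playlist_track_ids.any (fun t => (List.lookup t filtered_track_map).isSome)) = true ∧ 1 ≤ max_len
instance (playlist_track_ids : List Int) (filtered_track_map : List (Int × Int)) (pad_idx : Int) (max_len : Int) : Decidable (Pre_build_stage3_playlist_indices playlist_track_ids filtered_track_map pad_idx max_len) := by unfold Pre_build_stage3_playlist_indices; infer_instance

def pvWitness_build_stage3_playlist_indices : List Int × (List (Int × Int)) × Int × Int := ([1, 2], [(1, 5)], 0, 3)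

def Spec_build_stage3_playlist_indices (playlist_track_ids : List Int) (filtered_track_map : List (Int × Int)) (pad_idx : Int) (max_len : Int) (out : List Int) : Prop := out = build_stage3_playlist_indices_alt playlist_track_ids filtered_track_map pad_idx max_len
instance (playlist_track_ids : List Int) (filtered_track_map : List (Int × Int)) (pad_idx : Int) (max_len : Int) (out : List Int) : Decidable (Spec_build_stage3_playlist_indices playlist_track_ids filtered_track_map pad_idx max_len out) := by unfold Spec_build_stage3_playlist_indices; infer_instance

-- ===== CLAIM (what is proved, stated in full; the proofs are below) =====
def Claim_equal_build_stage3_playlist_indices : Prop := ∀ (playlist_track_ids : List Int) (filtered_track_map : List (Int × Int)) (pad_idx : Int) (max_len : Int), Dom_build_stage3_playlist_indices playlist_track_ids filtered_track_map pad_idx max_len → Pre_build_stage3_playlist_indices playlist_track_ids filtered_track_map pad_idx max_len → Spec_build_stage3_playlist_indices playlist_track_ids filtered_track_map pad_idx max_len (build_stage3_playlist_indices playlist_track_ids filtered_track_map pad_idx max_len)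

-- ===== LEMMAS AND PROOFS =====

-- A's comprehension fold is filterMap of the dict lookup
theorem pv_foldA_eq_filterMap (m : List (Int × Int)) (l : List Int) (acc : List Int) :
    l.foldl (fun acc track_id =>
      match List.lookup track_id m with
      | some v => acc ++ [v]
      | none => acc) acc = acc ++ l.filterMap (fun t => List.lookup t m) := by
  induction l generalizing acc with
  | nil => simp
  | cons t rest ih =>
    simp only [List.foldl_cons, List.filterMap_cons]
    cases h : List.lookup t m with
    | none => simp [h, ih]
    | some v => simp [h, ih]

-- B's loop appends the first (max_len - collected.length) matches of the remaining list
theorem pv_collect_spec (m : List (Int × Int)) (ml : Int) (l : List Int) :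
    ∀ acc : List Int, (acc.length : Int) ≤ ml →
    pvCollectTail m ml l acc = acc ++ (l.filterMap (fun t => List.lookup t m)).take (ml - acc.length).toNat := by
  induction l with
  | nil => intro acc _; simp [pvCollectTail]
  | cons t rest ih =>
    intro acc hle
    by_cases heq : (acc.length : Int) = ml
    · simp [pvCollectTail, heq, show (ml - (acc.length : Int)).toNat = 0 by omega]
    · have hlt : (acc.length : Int) < ml := lt_of_le_of_ne hle heq
      simp only [pvCollectTail, if_neg heq, List.filterMap_cons]
      cases h : List.lookup t m with
      | none => exact ih acc hle
      | some v =>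
        show pvCollectTail m ml rest (acc ++ [v]) =
          acc ++ (v :: rest.filterMap (fun t => List.lookup t m)).take (ml - (acc.length : Int)).toNat
        rw [ih (acc ++ [v]) (by simp; omega)]
        have hn : (ml - (acc.length : Int)).toNat = (ml - ((acc ++ [v]).length : Int)).toNat + 1 := by
          simp; omega
        rw [hn, List.take_succ_cons]
        simp

theorem build_stage3_playlist_indices_spec : Claim_equal_build_stage3_playlist_indices := by
  intro ids m pad ml _ hpre
  obtain ⟨hany, hml⟩ := hpre
  unfold Spec_build_stage3_playlist_indices build_stage3_playlist_indices build_stage3_playlist_indices_alt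
  set f : Int → Option Int := fun t => List.lookup t m with hf
  set P : List Int := ids.filterMap f with hP
  have hPne : P ≠ [] := by
    rw [List.any_eq_true] at hany
    obtain ⟨t, ht, hsome⟩ := hany
    rw [Option.isSome_iff_exists] at hsome
    obtain ⟨v, hv⟩ := hsome
    intro hnil
    have : v ∈ P := List.mem_filterMap.mpr ⟨t, ht, hv⟩
    simp [hnil] at this
  have hA : ids.foldl (fun acc track_id =>
      match List.lookup track_id m with
      | some v => acc ++ [v]
      | none => acc) [] = P := by
    simpa using pv_foldA_eq_filterMap m ids []
  have hrev : ids.reverse.filterMap f = P.reverse := by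
    rw [hP, List.filterMap_reverse]
  have hC : pvCollectTail m ml ids.reverse [] = P.reverse.take ml.toNat := by
    rw [pv_collect_spec m ml ids.reverse [] (by simp; omega), hrev]
    simp
  have hCne : P.reverse.take ml.toNat ≠ [] := by
    simp only [ne_eq, List.take_eq_nil_iff, List.reverse_eq_nil_iff]
    push_neg
    exact ⟨by omega, hPne⟩
  have hslice : PySem.List.slice P (some (-ml)) none = P.drop (P.length - ml.toNat) := by
    have h1 : (-ml) = -((ml.toNat : Nat) : Int) := by omega
    rw [h1, PySem.List.slice_from_neg_natCast P ml.toNat (by omega)]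
  have hCrev : (P.reverse.take ml.toNat).reverse = P.drop (P.length - ml.toNat) := by
    rw [List.take_reverse, List.reverse_reverse]
  simp only [hA, hC, if_neg hPne, if_neg hCne, hslice, hCrev]
  have hlen : (P.reverse.take ml.toNat).length = (P.drop (P.length - ml.toNat)).length := by
    rw [← hCrev, List.length_reverse]
  rw [hlen]
  by_cases hlt : ((P.drop (P.length - ml.toNat)).length : Int) < ml
  · rw [if_pos hlt]
  · rw [if_neg hlt]
    have h0 : (ml - ((P.drop (P.length - ml.toNat)).length : Int)).toNat = 0 := by omega
    rw [h0, List.replicate_zero, List.nil_append]
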